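-- pv_equiv track=rewrite | github.com/EUD-curso-python/funciones_y_clases-dsandoval1234 | funciones_y_clases.py | contar_valles
-- ===== SOURCE A (Python) =====
-- def contar_valles(ListaInput):
--     r'''Contar el número de valles
--
--     Esta función debe recibir como argumento una lista de -1's, 0's y 1's, y lo
--     que representan son las subidas y las bajadas en una ruta de caminata. -1
--     representa un paso hacia abajo, el 0 representa un paso hacia adelante y el
--     1 representa un paso hacia arriba, entonces por ejemplo, para la lista
--     [-1,1,0,1,1,-1,0,0,1,-1,1,1,-1,-1] representa la siguiente ruta:
--
--                 /\
--          /\__/\/  \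
--        _/
--      \/
--
--     El objetivo de esta función es devolver el número de valles que estén
--     representados en la lista, que para el ejemplo que se acaba de mostrar es
--     de 3 valles.
--     '''
--     ContValles=0
--     for i, elemento in enumerate(ListaInput):
--       if i==0:
--         continue
--       else:
--         if ListaInput[i]==1 and ListaInput[i-1]==-1:
--           ContValles=ContValles+1
--         if ListaInput[i]==1 and ListaInput[i-1]==0:
--             x=i-1
--             while x != 0:
--               if ListaInput[x]==-1:
--                 ContValles=ContValles+1
--                 break
--               elif ListaInput[x]==1:
--                 break
--               else:
--                 x=x-1
--     return ContValles
--
--     pass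
-- ===== SOURCE B (Python) =====
-- def contar_valles(ListaInput):
--     '''Count valleys in one pass: a step up (1) ends a valley when the previous
--     step was down (-1), or was flat (0) and the nearest non-flat step before
--     the flats was down.'''
--     ContValles = 0
--     ultimo = 0      # last up/down step seen so far (0 = none yet)
--     prev = None     # previous step
--     for paso in ListaInput:
--         if paso == 1 and prev is not None and (prev == -1 or (prev == 0 and ultimo == -1)):
--             ContValles += 1
--         if paso == 1 or paso == -1:
--             ultimo = paso
--         prev = paso
--     return ContValles
-- ===== Notes on version B (the rewrite author's own statement) =====
-- stated objective: alternative
-- what changed: Replaces the per-element backward rescan with a single forward pass that tracks the previous step and the last non-flat step, so the inner while loop disappears (O(n^2) worst case becomes O(n); measured only ~1.35x on generated inputs, where the rescans are rare).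
-- intended difference: On lists starting with -1 followed by no up/down steps until a 1 preceded by a 0 at index >= 2, A's backward scan stops before reaching index 0 and misses that valley, returning one less; B counts it, which is the intended valley count per the docstring. — e.g. on contar_valles([-1, 0, 1]): A returns 0, B returns 1
import Mathlib
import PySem

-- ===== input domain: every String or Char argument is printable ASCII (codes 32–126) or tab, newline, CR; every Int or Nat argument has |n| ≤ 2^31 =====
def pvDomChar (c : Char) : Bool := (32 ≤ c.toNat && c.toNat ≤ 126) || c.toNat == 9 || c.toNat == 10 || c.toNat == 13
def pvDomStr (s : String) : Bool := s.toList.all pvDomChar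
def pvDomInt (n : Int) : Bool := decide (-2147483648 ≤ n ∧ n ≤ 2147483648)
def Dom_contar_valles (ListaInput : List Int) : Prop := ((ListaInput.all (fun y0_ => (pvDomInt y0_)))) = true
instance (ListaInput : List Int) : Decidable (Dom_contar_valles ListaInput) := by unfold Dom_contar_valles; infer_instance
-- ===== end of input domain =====

-- B replaces A's backward rescans by one forward pass tracking the previous step and the
-- last non-flat step (objective: alternative); B also counts the valley A's backward scan
-- misses when the only step down before a climb sits at index 0 (stated as D_ below).

-- ===== PORT A =====
-- inner while loop of A: scan indices x, x-1, …, 1 (index 0 is never examined);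
-- all indices accessed are in range, so List.getD is exact for Python's ListaInput[x]
def pvScanA (L : List Int) : Nat → Bool
  | 0 => false
  | x + 1 =>
    if L.getD (x + 1) 0 = -1 then true
    else if L.getD (x + 1) 0 = 1 then false
    else pvScanA L x

def contar_valles (ListaInput : List Int) : Int :=
  (List.range ListaInput.length).foldl (fun ContValles i =>
    if i = 0 then ContValles
    else
      let c1 := if ListaInput.getD i 0 = 1 ∧ ListaInput.getD (i - 1) 0 = -1
                then ContValles + 1 else ContValles
      if ListaInput.getD i 0 = 1 ∧ ListaInput.getD (i - 1) 0 = 0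
      then (if pvScanA ListaInput (i - 1) then c1 + 1 else c1) else c1) 0

-- ===== PORT B =====
-- state = (ContValles, ultimo, prev); prev = none before the first step
def contar_valles_alt (ListaInput : List Int) : Int :=
  (ListaInput.foldl (fun (st : Int × Int × Option Int) paso =>
      let cnt := if paso = 1 ∧ st.2.2.isSome ∧
                    (st.2.2 = some (-1) ∨ (st.2.2 = some 0 ∧ st.2.1 = -1))
                 then st.1 + 1 else st.1
      let ult := if paso = 1 ∨ paso = -1 then paso else st.2.1
      (cnt, ult, some paso)) (0, 0, none)).1

-- ===== PRECONDITION & SPEC =====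
-- On lists starting with -1 followed by no up/down steps until a 1 preceded by a 0 at
-- index ≥ 2, A's backward scan stops before reaching index 0 and misses that valley,
-- returning one less; B counts it, which is the intended valley count per the docstring.
def D_contar_valles (ListaInput : List Int) : Prop :=
  ListaInput.getD 0 0 = -1 ∧ ∃ i < ListaInput.length, ListaInput.getD (i - 1) 0 = 0 ∧
    ListaInput.getD i 0 = 1 ∧ ∀ x ∈ (ListaInput.take i).tail, x ≠ -1 ∧ x ≠ 1
instance (ListaInput : List Int) : Decidable (D_contar_valles ListaInput) := by
  unfold D_contar_valles; infer_instance

def Spec_contar_valles (ListaInput : List Int) (out : Int) : Prop :=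
  ¬ D_contar_valles ListaInput → out = contar_valles_alt ListaInput
instance (ListaInput : List Int) (out : Int) : Decidable (Spec_contar_valles ListaInput out) := by
  unfold Spec_contar_valles; infer_instance

def pvDiffWitness_contar_valles : List Int := [-1, 0, 1]
def pvDiffWitnessOut_contar_valles : Int × Int := (0, 1)

-- ===== CLAIM (what is proved, stated in full; the proofs are below) =====
def Claim_unchanged_contar_valles : Prop := ∀ (ListaInput : List Int), Dom_contar_valles ListaInput → Spec_contar_valles ListaInput (contar_valles ListaInput)
def Claim_changed_contar_valles : Prop := Dom_contar_valles (pvDiffWitness_contar_valles) ∧ D_contar_valles (pvDiffWitness_contar_valles) ∧ contar_valles (pvDiffWitness_contar_valles) = pvDiffWitnessOut_contar_valles.1 ∧ contar_valles_alt (pvDiffWitness_contar_valles) = pvDiffWitnessOut_contar_valles.2 ∧ pvDiffWitnessOut_contar_valles.1 ≠ pvDiffWitnessOut_contar_valles.2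
def Claim_exact_contar_valles : Prop := ∀ (ListaInput : List Int), Dom_contar_valles ListaInput → D_contar_valles ListaInput → contar_valles ListaInput ≠ contar_valles_alt ListaInput

-- ===== LEMMAS AND PROOFS =====

-- last up/down step of a list (0 if none); the `ultimo` component of B's fold state
def pvUpd (s a : Int) : Int := if a = 1 then 1 else if a = -1 then -1 else s
def pvLast (L : List Int) : Int := L.foldl pvUpd 0

lemma pvLast_aux (L : List Int) : ∀ s : Int, L.foldl pvUpd s = if pvLast L = 0 then s else pvLast L := by
  induction L with
  | nil => intro s; simp [pvLast]
  | cons b t ih =>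
    intro s
    have h1 : pvLast (b :: t) = if pvLast t = 0 then pvUpd 0 b else pvLast t := by
      simpa [pvLast, List.foldl_cons] using ih (pvUpd 0 b)
    simp only [List.foldl_cons, h1, pvUpd]
    split_ifs <;> simp_all

lemma pvLast_cons (b : Int) (t : List Int) :
    pvLast (b :: t) = if pvLast t = 0 then pvUpd 0 b else pvLast t := by
  simpa [pvLast, List.foldl_cons] using pvLast_aux t (pvUpd 0 b)

lemma pvLast_snoc (t : List Int) (b : Int) : pvLast (t ++ [b]) = pvUpd (pvLast t) b := by
  simp [pvLast, List.foldl_append]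

lemma pvLast_zero_iff (t : List Int) :
    pvLast t = 0 ↔ ∀ x ∈ t, x ≠ -1 ∧ x ≠ 1 := by
  induction t with
  | nil => simp [pvLast]
  | cons b t ih =>
    rw [pvLast_cons]
    constructor
    · intro h
      by_cases h0 : pvLast t = 0
      · rw [if_pos h0] at h
        intro x hx
        rcases List.mem_cons.mp hx with rfl | hx
        · constructor <;> rintro rfl <;> simp [pvUpd] at h
        · exact ih.mp h0 x hx
      · rw [if_neg h0] at h; exact absurd h h0
    · intro h
      have hb := h b (by simp)
      have ht0 : pvLast t = 0 := ih.mpr (fun x hx => h x (by simp [hx]))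
      simp only [ht0, if_true, pvUpd]
      rw [if_neg hb.2, if_neg hb.1]

lemma scan_append (L : List Int) (a : Int) : ∀ x : Nat, x < L.length →
    pvScanA (L ++ [a]) x = pvScanA L x := by
  intro x
  induction x with
  | zero => intro _; rfl
  | succ x ih =>
    intro hx
    have hgd : (L ++ [a]).getD (x + 1) 0 = L.getD (x + 1) 0 := List.getD_append _ _ _ _ hx
    simp only [pvScanA, hgd, ih (by omega)]

lemma scan_eq_last (L : List Int) : ∀ x : Nat, x < L.length →
    pvScanA L x = decide (pvLast (L.tail.take x) = -1) := by
  intro x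
  induction x with
  | zero => intro _; simp [pvScanA, pvLast]
  | succ x ih =>
    intro hx
    have htake : L.tail.take (x + 1) = L.tail.take x ++ [L.getD (x + 1) 0] := by
      rw [← List.drop_one, List.take_add_one, List.getElem?_drop]
      rw [List.getElem?_eq_getElem (by omega : 1 + x < L.length)]
      rw [List.getD_eq_getElem L 0 (by omega : x + 1 < L.length)]
      simp [show 1 + x = x + 1 by omega]
    rw [htake, pvLast_snoc]
    simp only [pvScanA]
    unfold pvUpd
    by_cases hm : L.getD (x + 1) 0 = -1
    · rw [if_pos hm, hm]; simp
    · by_cases hp : L.getD (x + 1) 0 = 1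
      · rw [if_neg hm, if_pos hp, hp]; simp
      · rw [if_neg hm, if_neg hp, if_neg hp, if_neg hm, ih (by omega)]

lemma A_snoc (L : List Int) (a : Int) (hL : L ≠ []) :
    contar_valles (L ++ [a]) =
      (let A := contar_valles L
       let c1 := if a = 1 ∧ L.getD (L.length - 1) 0 = -1 then A + 1 else A;
       if a = 1 ∧ L.getD (L.length - 1) 0 = 0 then (if pvLast L.tail = -1 then c1 + 1 else c1) else c1) := by
  have hn : 1 ≤ L.length := List.length_pos_iff.mpr hL
  unfold contar_valles
  rw [show (L ++ [a]).length = L.length + 1 from by simp, List.range_succ, List.foldl_append]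
  rw [PySem.List.foldl_congr_mem (List.range L.length)
      (fun ContValles i =>
        if i = 0 then ContValles
        else
          let c1 := if (L ++ [a]).getD i 0 = 1 ∧ (L ++ [a]).getD (i - 1) 0 = -1
                    then ContValles + 1 else ContValles
          if (L ++ [a]).getD i 0 = 1 ∧ (L ++ [a]).getD (i - 1) 0 = 0
          then (if pvScanA (L ++ [a]) (i - 1) then c1 + 1 else c1) else c1)
      (fun ContValles i =>
        if i = 0 then ContValles
        else
          let c1 := if L.getD i 0 = 1 ∧ L.getD (i - 1) 0 = -1
                    then ContValles + 1 else ContValles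
          if L.getD i 0 = 1 ∧ L.getD (i - 1) 0 = 0
          then (if pvScanA L (i - 1) then c1 + 1 else c1) else c1)
      0 (by
        intro acc i hi
        have hi' : i < L.length := List.mem_range.mp hi
        by_cases h0i : i = 0
        · simp [h0i]
        · have e1 := List.getD_append L [a] 0 i hi'
          have e2 := List.getD_append L [a] 0 (i - 1) (by omega)
          have e3 := scan_append L a (i - 1) (by omega)
          simp only [h0i, if_false, e1, e2, e3])]
  have ega : (L ++ [a]).getD L.length 0 = a := by
    rw [List.getD_append_right L [a] 0 L.length (le_refl _)]; simp
  have egm : (L ++ [a]).getD (L.length - 1) 0 = L.getD (L.length - 1) 0 :=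
    List.getD_append _ _ _ _ (by omega)
  have esc : pvScanA (L ++ [a]) (L.length - 1) = decide (pvLast L.tail = -1) := by
    rw [scan_append L a _ (by omega), scan_eq_last L _ (by omega)]
    have ht : L.tail.take (L.length - 1) = L.tail := by
      rw [show L.length - 1 = L.tail.length from by simp]
      exact List.take_length
    rw [ht]
  simp only [List.foldl_cons, List.foldl_nil]
  rw [if_neg (by omega : ¬ L.length = 0), ega, egm, esc]
  by_cases hsc : pvLast L.tail = -1 <;> simp [hsc]

lemma alt_state (L : List Int) : ∀ c u : Int, ∀ p : Option Int,
    (L.foldl (fun (st : Int × Int × Option Int) paso =>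
      let cnt := if paso = 1 ∧ st.2.2.isSome ∧
                    (st.2.2 = some (-1) ∨ (st.2.2 = some 0 ∧ st.2.1 = -1))
                 then st.1 + 1 else st.1
      let ult := if paso = 1 ∨ paso = -1 then paso else st.2.1
      (cnt, ult, some paso)) (c, u, p)).2 = (L.foldl pvUpd u, L.getLast?.or p) := by
  induction L with
  | nil => intro c u p; simp
  | cons b t ih =>
    intro c u p
    simp only [List.foldl_cons]
    rw [ih]
    simp only [Prod.mk.injEq]
    refine ⟨?_, ?_⟩
    · -- ultimo component
      congr 1
      unfold pvUpd
      by_cases h1 : b = 1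
      · simp [h1]
      · by_cases h2 : b = -1 <;> simp [h1, h2]
    · -- prev component
      rcases List.eq_nil_or_concat t with rfl | ⟨s, x, rfl⟩
      · simp
      · simp only [List.concat_eq_append]
        rw [List.getLast?_concat, show (b :: (s ++ [x])) = (b :: s) ++ [x] by rw [List.cons_append], List.getLast?_concat]
        simp

lemma B_snoc (L : List Int) (a : Int) :
    contar_valles_alt (L ++ [a]) =
      if a = 1 ∧ L.getLast?.isSome ∧
         (L.getLast? = some (-1) ∨ (L.getLast? = some 0 ∧ pvLast L = -1))
      then contar_valles_alt L + 1 else contar_valles_alt L := by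
  unfold contar_valles_alt
  rw [List.foldl_append]
  have hst := alt_state L 0 0 none
  set F := (fun (st : Int × Int × Option Int) paso =>
      let cnt := if paso = 1 ∧ st.2.2.isSome ∧
                    (st.2.2 = some (-1) ∨ (st.2.2 = some 0 ∧ st.2.1 = -1))
                 then st.1 + 1 else st.1
      let ult := if paso = 1 ∨ paso = -1 then paso else st.2.1
      (cnt, ult, some paso)) with hF
  obtain ⟨c₀, u₀, p₀, hLst⟩ : ∃ c u p, L.foldl F (0, 0, none) = (c, u, p) :=
    ⟨_, _, _, rfl⟩
  rw [hLst] at hst ⊢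
  simp only [List.foldl_cons, List.foldl_nil]
  have hu : u₀ = pvLast L := by
    have := congrArg Prod.fst hst; simpa [pvLast] using this
  have hp : p₀ = L.getLast?.or none := by
    have := congrArg Prod.snd hst; simpa using this
  rw [Option.or_none] at hp
  subst hu hp
  rfl

lemma D_snoc (L : List Int) (a : Int) (hL : L ≠ []) :
    D_contar_valles (L ++ [a]) ↔ D_contar_valles L ∨
      (a = 1 ∧ L.getD (L.length - 1) 0 = 0 ∧ L.getD 0 0 = -1 ∧ ∀ x ∈ L.tail, x ≠ -1 ∧ x ≠ 1) := by
  have hlen : 1 ≤ L.length := List.length_pos_iff.mpr hL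
  have h0e : (L ++ [a]).getD 0 0 = L.getD 0 0 := List.getD_append _ _ _ _ (by omega)
  constructor
  · rintro ⟨h0v, i, hi, hprev, h1v, hall⟩
    rw [h0e] at h0v
    simp only [List.length_append, List.length_cons, List.length_nil] at hi
    by_cases hin : i < L.length
    · left
      refine ⟨h0v, i, hin, ?_, ?_, ?_⟩
      · rwa [List.getD_append _ _ _ _ (by omega)] at hprev
      · rwa [List.getD_append _ _ _ _ hin] at h1v
      · rwa [List.take_append_of_le_length (by omega)] at hall
    · have hieq : i = L.length := by omega
      subst hieq
      right
      refine ⟨?_, ?_, h0v, ?_⟩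
      · rw [List.getD_append_right _ _ _ _ (le_refl _)] at h1v; simpa using h1v
      · rwa [List.getD_append _ _ _ _ (by omega)] at hprev
      · rwa [List.take_left] at hall
  · rintro (⟨h0v, i, hi, hprev, h1v, hall⟩ | ⟨ha1, hprev, h0v, hall⟩)
    · refine ⟨by rwa [h0e], i, by simp; omega, ?_, ?_, ?_⟩
      · rwa [List.getD_append _ _ _ _ (by omega)]
      · rwa [List.getD_append _ _ _ _ hi]
      · rwa [List.take_append_of_le_length (by omega)]
    · refine ⟨by rwa [h0e], L.length, by simp, ?_, ?_, ?_⟩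
      · rwa [List.getD_append _ _ _ _ (by omega)]
      · rw [List.getD_append_right _ _ _ _ (le_refl _)]; simpa using ha1
      · rwa [List.take_left]

lemma D_head_false (h0 : Int) (t0 : List Int) (hz : ∀ x ∈ t0, x ≠ -1 ∧ x ≠ 1) :
    ¬ D_contar_valles (h0 :: t0) := by
  rintro ⟨h0v, i, hi, -, h1v, -⟩
  rw [List.getD_cons_zero] at h0v
  rcases i with - | j
  · rw [List.getD_cons_zero] at h1v; omega
  · rw [List.getD_cons_succ] at h1v
    have hjl : j < t0.length := by simp at hi; omega
    rw [List.getD_eq_getElem _ _ hjl] at h1v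
    exact (hz _ (List.getElem_mem hjl)).2 h1v

lemma key (L : List Int) :
    contar_valles_alt L = contar_valles L + (if D_contar_valles L then 1 else 0) := by
  induction L using List.reverseRecOn with
  | nil => decide
  | append_singleton L a ih =>
    rcases L with - | ⟨h0, t0⟩
    · -- first step: neither side counts, no D
      simp only [List.nil_append]
      have hD : ¬ D_contar_valles [a] := by
        rintro ⟨h0v, i, hi, -, h1v, -⟩
        simp only [List.length_cons, List.length_nil] at hi
        obtain rfl : i = 0 := by omega
        simp only [List.getD_cons_zero] at h0v h1v
        omega
      rw [if_neg hD]
      have hA : contar_valles [a] = 0 := by simp [contar_valles, List.range_succ]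
      have hB : contar_valles_alt [a] = 0 := by simp [contar_valles_alt]
      rw [hA, hB]
      simp
    have hA := A_snoc (h0 :: t0) a (by simp)
    have hB := B_snoc (h0 :: t0) a
    have hDsn := D_snoc (h0 :: t0) a (by simp)
    simp only [List.length_cons, Nat.add_sub_cancel, List.getD_cons_zero, List.tail_cons] at hA hB hDsn
    have hgl : (h0 :: t0).getLast? = some ((h0 :: t0).getD t0.length 0) := by
      rw [List.getLast?_eq_getElem?]
      simp only [List.length_cons, Nat.add_sub_cancel]
      rw [List.getElem?_eq_getElem (by simp : t0.length < (h0 :: t0).length)]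
      rw [List.getD_eq_getElem _ _ (by simp : t0.length < (h0 :: t0).length)]
    rw [hgl] at hB
    have hpvL := pvLast_cons h0 t0
    have hzt := pvLast_zero_iff t0
    set g := (h0 :: t0).getD t0.length 0 with hg
    rw [hA, hB]
    by_cases ha1 : a = 1
    · subst ha1
      by_cases hgm : g = -1
      · -- previous step was down: both count
        have hDeq : D_contar_valles (h0 :: t0 ++ [1]) ↔ D_contar_valles (h0 :: t0) := by
          rw [hDsn]
          constructor
          · rintro (h | ⟨-, hp0, -, -⟩)
            · exact h
            · rw [hgm] at hp0; norm_num at hp0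
          · exact Or.inl
        rw [if_congr hDeq rfl rfl]
        by_cases hd : D_contar_valles (h0 :: t0) <;>
          simp only [hd, if_true, if_false] at ih ⊢ <;> simp [hgm] <;> omega
      · by_cases hg0 : g = 0
        · -- previous step flat: both consult the last up/down step
          by_cases hm : pvLast t0 = -1
          · have hDeq : D_contar_valles (h0 :: t0 ++ [1]) ↔ D_contar_valles (h0 :: t0) := by
              rw [hDsn]
              constructor
              · rintro (h | ⟨-, -, -, hall⟩)
                · exact h
                · have := hzt.mpr hall; omega
              · exact Or.inl
            rw [if_congr hDeq rfl rfl]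
            have hL' : pvLast (h0 :: t0) = -1 := by rw [hpvL, if_neg (by omega)]; exact hm
            by_cases hd : D_contar_valles (h0 :: t0) <;>
              simp only [hd, if_true, if_false] at ih ⊢ <;> simp [hg0, hm, hL'] <;> omega
          · by_cases hz0 : pvLast t0 = 0
            · -- no up/down step in the tail: A never reaches index 0, B does
              have hall := hzt.mp hz0
              have hDL : ¬ D_contar_valles (h0 :: t0) := D_head_false h0 t0 hall
              have hL' : pvLast (h0 :: t0) = pvUpd 0 h0 := by rw [hpvL, if_pos hz0]
              by_cases hh0 : h0 = -1
              · -- the missed valley: D appears, B counts one more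
                have hDtrue : D_contar_valles (h0 :: t0 ++ [1]) := by
                  rw [hDsn]
                  exact Or.inr ⟨rfl, hg0, hh0, hall⟩
                rw [if_pos hDtrue]
                have hLm : pvLast (h0 :: t0) = -1 := by rw [hL', hh0]; simp [pvUpd]
                simp only [hDL, if_false] at ih
                simp [hg0, hz0, hLm]
                omega
              · -- head not a step down: nobody counts, no D
                have hDeq : D_contar_valles (h0 :: t0 ++ [1]) ↔ D_contar_valles (h0 :: t0) := by
                  rw [hDsn]
                  constructor
                  · rintro (h | ⟨-, -, hh, -⟩)
                    · exact h
                    · exact absurd hh hh0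
                  · exact Or.inl
                rw [if_congr hDeq rfl rfl]
                have hBc : pvUpd 0 h0 ≠ -1 := by
                  unfold pvUpd
                  by_cases h1 : h0 = 1
                  · simp [h1]
                  · rw [if_neg h1, if_neg hh0]; norm_num
                have hLm : pvLast (h0 :: t0) ≠ -1 := by rw [hL']; exact hBc
                by_cases hd : D_contar_valles (h0 :: t0) <;>
                  simp only [hd, if_true, if_false] at ih ⊢ <;> simp [hg0, hm, hLm] <;> omega
            · -- last up/down step in the tail was a climb
              have hDeq : D_contar_valles (h0 :: t0 ++ [1]) ↔ D_contar_valles (h0 :: t0) := by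
                rw [hDsn]
                constructor
                · rintro (h | ⟨-, -, -, hall⟩)
                  · exact h
                  · exact absurd (hzt.mpr hall) hz0
                · exact Or.inl
              rw [if_congr hDeq rfl rfl]
              have hL' : pvLast (h0 :: t0) = pvLast t0 := by rw [hpvL, if_neg hz0]
              by_cases hd : D_contar_valles (h0 :: t0) <;>
                simp only [hd, if_true, if_false] at ih ⊢ <;> simp [hg0, hm, hL'] <;> omega
        · -- previous step neither down nor flat: nobody counts, no D
          have hDeq : D_contar_valles (h0 :: t0 ++ [1]) ↔ D_contar_valles (h0 :: t0) := by
            rw [hDsn]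
            constructor
            · rintro (h | ⟨-, hp0, -, -⟩)
              · exact h
              · exact absurd hp0 hg0
            · exact Or.inl
          rw [if_congr hDeq rfl rfl]
          by_cases hd : D_contar_valles (h0 :: t0) <;>
            simp only [hd, if_true, if_false] at ih ⊢ <;> simp [hgm, hg0] <;> omega
    · -- the appended step is not a climb: nothing changes
      have hDeq : D_contar_valles (h0 :: t0 ++ [a]) ↔ D_contar_valles (h0 :: t0) := by
        rw [hDsn]
        constructor
        · rintro (h | ⟨h, -⟩)
          · exact h
          · exact absurd h ha1
        · exact Or.inl
      rw [if_congr hDeq rfl rfl]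
      by_cases hd : D_contar_valles (h0 :: t0) <;>
        simp only [hd, if_true, if_false] at ih ⊢ <;> simp [ha1] <;> omega

-- ===== VERDICT (by name: the statement is the Claim_ definition above) =====
theorem contar_valles_spec : Claim_unchanged_contar_valles := by
  intro L _ hD
  have h := key L
  simp [hD] at h
  exact h.symm

theorem contar_valles_changed : Claim_changed_contar_valles := by
  unfold Claim_changed_contar_valles; decide

theorem contar_valles_tight : Claim_exact_contar_valles := by
  intro L _ hD
  have h := key L
  simp [hD] at h
  omega
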